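-- pv_equiv track=rewrite | github.com/julian1c2a/ElectroCore | core/formal_languages.py | hamming_sphere
-- ===== SOURCE A (Python) =====
-- import itertools
--
-- def hamming_sphere(center: str, radius: int, alphabet: str = '01') -> set:
--     """
--     Genera la esfera de Hamming de radio r centrada en una palabra.
--
--     La esfera de Hamming B(x, r) es el conjunto de todas las palabras a
--     distancia como máximo r de x.
--
--     Args:
--         center: Palabra central
--         radius: Radio de la esfera (número máximo de diferencias)
--         alphabet: Alfabeto a usar (por defecto binario '01')
--
--     Returns:
--         set: Conjunto de palabras en la esfera
--
--     Ejemplo: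
--         >>> sorted(hamming_sphere('101', 1))
--         ['001', '100', '101', '111']
--         >>> len(hamming_sphere('000', 2))
--         7  # C(3,0) + C(3,1) + C(3,2) = 1 + 3 + 3
--
--     Nota:
--         El volumen de la esfera es V(n, r) = Σᵢ₌₀ʳ C(n, i) · (|Σ| - 1)ⁱ
--     """
--     n = len(center)
--     sphere = set()
--
--     # Para cada número de posiciones a cambiar (de 0 a radius)
--     for r in range(radius + 1):
--         # Elegir qué posiciones cambiar
--         for positions in itertools.combinations(range(n), r):
--             # Para cada combinación de símbolos en esas posiciones
--             for symbols in itertools.product(alphabet, repeat=r):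
--                 word = list(center)
--                 for pos, sym in zip(positions, symbols):
--                     if sym != center[pos]:  # Solo si realmente cambia
--                         word[pos] = sym
--                 sphere.add(''.join(word))
--
--     return sphere
-- ===== SOURCE B (Python) =====
-- def _combos(l, r):
--     # all sorted r-element selections from l, in lexicographic order
--     if r == 0:
--         return [[]]
--     if len(l) < r:
--         return []
--     head, tail = l[0], l[1:]
--     return [[head] + rest for rest in _combos(tail, r - 1)] + _combos(tail, r)
--
--
-- def _fill(allowed, word, positions):
--     # substitute every position in `positions` by each of its allowed symbols
--     if not positions:
--         return [''.join(word)]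
--     p = positions[0]
--     out = []
--     for s in allowed[p]:
--         out.extend(_fill(allowed, word[:p] + [s] + word[p + 1:], positions[1:]))
--     return out
--
--
-- def hamming_sphere(center: str, radius: int, alphabet: str = '01') -> set:
--     n = len(center)
--     # per position: the distinct alphabet symbols that actually change it
--     allowed = [[s for s in dict.fromkeys(alphabet) if s != ch] for ch in center]
--     result = []
--     for r in range(min(radius, n) + 1):
--         for positions in _combos(list(range(n)), r):
--             result.extend(_fill(allowed, list(center), positions))
--     return set(result)
-- ===== Notes on version B (the rewrite author's own statement) =====
-- stated objective: alternative
-- what changed: B generates each sphere word exactly once by recursively choosing the substituted positions and, at each chosen position, only the deduplicated alphabet symbols that differ from the center symbol (and caps the substitution count at len(center)), instead of A's enumeration of all |alphabet|^r symbol tuples per position combination followed by set-based deduplication; intended as faster (it enumerates C(n,r)*(|A|-1)^r instead of C(n,r)*|A|^r candidates), but a timing run could not obtain a clean reading at sizes where both finish.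
import Mathlib
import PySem

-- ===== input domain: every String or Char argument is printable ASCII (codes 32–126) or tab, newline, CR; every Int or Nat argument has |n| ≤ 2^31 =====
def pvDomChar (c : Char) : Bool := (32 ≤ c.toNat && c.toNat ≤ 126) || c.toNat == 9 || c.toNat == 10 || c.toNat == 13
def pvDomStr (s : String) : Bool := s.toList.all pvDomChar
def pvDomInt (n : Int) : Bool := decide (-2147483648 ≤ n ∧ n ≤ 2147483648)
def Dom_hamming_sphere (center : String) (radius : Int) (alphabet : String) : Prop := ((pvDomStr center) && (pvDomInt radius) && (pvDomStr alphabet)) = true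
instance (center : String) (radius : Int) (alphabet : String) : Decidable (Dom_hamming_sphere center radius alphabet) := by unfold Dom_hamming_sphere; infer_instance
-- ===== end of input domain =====

-- B generates each sphere word exactly once (positions + changed symbols only, radius capped at the
-- word length) instead of A's full |alphabet|^r tuple enumeration deduplicated through a set.

-- ===== PORT A =====
-- itertools.combinations(l, r) (tuples as lists, lexicographic order)
def combA : List Int → Nat → List (List Int)
  | _, 0 => [[]]
  | [], _ + 1 => []
  | x :: xs, r + 1 => ((combA xs r).map (x :: ·)) ++ combA xs (r + 1)

-- itertools.product(alpha, repeat=r) (tuples as lists, leftmost slot varies slowest)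
def prodA (alpha : List Char) : Nat → List (List Char)
  | 0 => [[]]
  | r + 1 => alpha.flatMap (fun a => (prodA alpha r).map (a :: ·))

-- word = list(center); for pos, sym in zip(positions, symbols): if sym != center[pos]: word[pos] = sym
-- (positions come from range(len(center)), so the pyGetD/pySetD indices are in range)
def wordA (c : List Char) (ps : List Int) (ss : List Char) : List Char :=
  (ps.zip ss).foldl
    (fun w pr => if pr.2 ≠ PySem.List.pyGetD c pr.1 ' ' then PySem.List.pySetD w pr.1 pr.2 else w) c

def hamming_sphere (center : String) (radius : Int) (alphabet : String) : List String :=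
  let n : Int := PySem.Str.len center
  (PySem.List.pyRange 0 (radius + 1) 1).foldl
    (fun sphere r =>
      (combA (PySem.List.pyRange 0 n 1) r.toNat).foldl
        (fun sphere ps =>
          (prodA alphabet.toList r.toNat).foldl
            (fun sphere ss => PySem.Set.add sphere (String.ofList (wordA center.toList ps ss)))
            sphere)
        sphere)
    PySem.Set.empty

-- ===== PORT B =====
-- _combos(l, r): all sorted r-element selections of l, lexicographic
def combB : List Int → Nat → List (List Int)
  | _, 0 => [[]]
  | l, r + 1 =>
    if l.length < r + 1 then []
    else match l with
      | [] => []
      | head :: tail => ((combB tail r).map (fun rest => head :: rest)) ++ combB tail (r + 1)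

-- _fill(allowed, word, positions)
def fillB (allowed : List (List Char)) (word : List Char) : List Int → List String
  | [] => [String.ofList word]
  | p :: ps =>
    (PySem.List.pyGetD allowed p []).flatMap
      (fun s => fillB allowed (PySem.List.pySetD word p s) ps)

def hamming_sphere_alt (center : String) (radius : Int) (alphabet : String) : List String :=
  let n : Int := PySem.Str.len center
  let allowed := center.toList.map
    (fun ch => (PySem.List.dedup alphabet.toList).filter (fun s => s ≠ ch))
  let result := (PySem.List.pyRange 0 (min radius n + 1) 1).foldl
    (fun acc r =>
      (combB (PySem.List.pyRange 0 n 1) r.toNat).foldl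
        (fun acc ps => acc ++ fillB allowed center.toList ps) acc)
    []
  PySem.Set.ofList result

-- ===== PRECONDITION & SPEC =====
def Spec_hamming_sphere (center : String) (radius : Int) (alphabet : String) (out : List String) : Prop := out = hamming_sphere_alt center radius alphabet
instance (center : String) (radius : Int) (alphabet : String) (out : List String) : Decidable (Spec_hamming_sphere center radius alphabet out) := by unfold Spec_hamming_sphere; infer_instance

-- ===== CLAIM (what is proved, stated in full; the proofs are below) =====
def Claim_equal_hamming_sphere : Prop := ∀ (center : String) (radius : Int) (alphabet : String), Dom_hamming_sphere center radius alphabet → Spec_hamming_sphere center radius alphabet (hamming_sphere center radius alphabet)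

-- ===== LEMMAS AND PROOFS =====

-- ---------- proof-side definitions ----------

-- Nat-level mirror of combA
def combN : List Nat → Nat → List (List Nat)
  | _, 0 => [[]]
  | [], _ + 1 => []
  | x :: xs, r + 1 => ((combN xs r).map (x :: ·)) ++ combN xs (r + 1)

-- product of a list of choice lists (leftmost slot varies slowest)
def prodF : List (List Char) → List (List Char)
  | [] => [[]]
  | l :: ls => l.flatMap (fun a => (prodF ls).map (a :: ·))

-- substitute a list of (position, symbol) pairs
def substP (w : List Char) (q : List (Nat × Char)) : List Char :=
  q.foldl (fun w pr => w.set pr.1 pr.2) w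

-- sorted list of positions where w differs from cs
def diffs (cs w : List Char) : List Nat :=
  (List.range cs.length).filter (fun i => decide (w[i]? ≠ cs[i]?))

-- w has cs's length and every changed character comes from alpha
def okP (cs alpha w : List Char) : Prop :=
  w.length = cs.length ∧ ∀ (i : Nat) (x y : Char), w[i]? = some x → cs[i]? = some y → x ≠ y → x ∈ alpha

def goodPs (n : Nat) (ps : List Nat) : Prop := ps.Pairwise (· < ·) ∧ ∀ p ∈ ps, p < n

def aAt (cs alpha : List Char) (p : Nat) : List Char :=
  (PySem.List.dedup alpha).filter (fun s => s ≠ cs.getD p ' ')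

def ALW (cs alpha : List Char) : List (List Char) :=
  cs.map (fun ch => (PySem.List.dedup alpha).filter (fun s => s ≠ ch))

def allb (cs : List Char) (psn : List Nat) (ss : List Char) : Bool :=
  (psn.zip ss).all (fun pr => pr.2 != cs.getD pr.1 ' ')

def Fw (cs : List Char) (psn : List Nat) (ss : List Char) : String :=
  String.ofList (wordA cs (psn.map (Nat.cast : Nat → Int)) ss)

def bblock (cs alpha : List Char) (psn : List Nat) : List String :=
  fillB (ALW cs alpha) cs (psn.map (Nat.cast : Nat → Int))

def ablock (cs alpha : List Char) (psn : List Nat) : List String :=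
  (prodA alpha psn.length).map (Fw cs psn)

def aLevelN (cs alpha : List Char) (r : Nat) : List String :=
  (combN (List.range cs.length) r).flatMap (ablock cs alpha)

def bLevelN (cs alpha : List Char) (r : Nat) : List String :=
  (combN (List.range cs.length) r).flatMap (bblock cs alpha)

-- ---------- generic Set/ofList lemmas ----------

theorem filter_ofList {α : Type} [BEq α] [LawfulBEq α] (p : α → Bool) (xs : List α) :
    (PySem.Set.ofList xs).filter p = PySem.Set.ofList (xs.filter p) := by
  induction xs using List.reverseRecOn with
  | nil => rfl
  | append_singleton xs x IH =>
    rw [PySem.Set.ofList_append_singleton, PySem.Set.add_eq_ite, List.filter_append]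
    by_cases hx : x ∈ xs
    · rw [if_pos ((PySem.Set.mem_ofList xs x).mpr hx)]
      by_cases hp : p x = true
      · have hxf : x ∈ xs.filter p := List.mem_filter.mpr ⟨hx, hp⟩
        simp only [List.filter_cons, hp, if_true, List.filter_nil]
        rw [PySem.Set.ofList_append_singleton,
          PySem.Set.add_of_mem ((PySem.Set.mem_ofList _ x).mpr hxf), IH]
      · simp only [List.filter_cons, hp, List.filter_nil, List.append_nil, IH,
          Bool.false_eq_true, if_false]
    · rw [if_neg (fun h => hx ((PySem.Set.mem_ofList xs x).mp h)), List.filter_append]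
      by_cases hp : p x = true
      · have hxf : x ∉ xs.filter p := fun h => hx (List.mem_filter.mp h).1
        simp only [List.filter_cons, hp, if_true, List.filter_nil]
        rw [PySem.Set.ofList_append_singleton,
          PySem.Set.add_of_not_mem (fun h => hxf ((PySem.Set.mem_ofList _ x).mp h)), IH]
      · simp only [List.filter_cons, hp, List.filter_nil, List.append_nil, IH,
          Bool.false_eq_true, if_false]

theorem ofList_map_injOn {α β : Type} [BEq α] [LawfulBEq α] [BEq β] [LawfulBEq β]
    (f : α → β) (l : List α) (hinj : ∀ x ∈ l, ∀ y ∈ l, f x = f y → x = y) :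
    PySem.Set.ofList (l.map f) = (PySem.Set.ofList l).map f := by
  induction l using List.reverseRecOn with
  | nil => rfl
  | append_singleton l x IH =>
    have hinj' : ∀ a ∈ l, ∀ b ∈ l, f a = f b → a = b := fun a ha b hb =>
      hinj a (List.mem_append_left _ ha) b (List.mem_append_left _ hb)
    rw [List.map_append, List.map_singleton, PySem.Set.ofList_append_singleton,
      PySem.Set.ofList_append_singleton, IH hinj']
    by_cases hx : x ∈ l
    · rw [PySem.Set.add_of_mem ((PySem.Set.mem_ofList l x).mpr hx),
        PySem.Set.add_of_mem]
      exact List.mem_map_of_mem ((PySem.Set.mem_ofList l x).mpr hx)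
    · rw [PySem.Set.add_of_not_mem (fun h => hx ((PySem.Set.mem_ofList l x).mp h)),
        PySem.Set.add_of_not_mem, List.map_append, List.map_singleton]
      intro h
      obtain ⟨y, hy, hfy⟩ := List.mem_map.mp h
      have hy' := (PySem.Set.mem_ofList l y).mp hy
      exact hx ((hinj y (List.mem_append_left _ hy') x (List.mem_append_right _ (List.mem_singleton_self x)) hfy) ▸ hy')

theorem ofList_flatMap_disjoint {α β : Type} [BEq α] [LawfulBEq α] [BEq β] [LawfulBEq β]
    (h : α → List β) (l : List α)
    (hdisj : ∀ a b, a ≠ b → ∀ x ∈ h a, x ∉ h b) :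
    PySem.Set.ofList (l.flatMap h) = (PySem.List.dedup l).flatMap (fun a => PySem.Set.ofList (h a)) := by
  induction l using List.reverseRecOn with
  | nil => rfl
  | append_singleton l a IH =>
    rw [List.flatMap_append, List.flatMap_singleton, PySem.Set.ofList_append,
      PySem.Set.update_eq_append_filter, PySem.List.dedup_eq_ofList,
      PySem.Set.ofList_append_singleton]
    by_cases ha : a ∈ l
    · rw [PySem.Set.add_of_mem ((PySem.Set.mem_ofList l a).mpr ha)]
      have hnil : (PySem.Set.ofList (h a)).filter
          (fun y => !(PySem.Set.contains (PySem.Set.ofList (l.flatMap h)) y)) = [] := by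
        apply List.filter_eq_nil_iff.mpr
        intro y hy
        have : y ∈ l.flatMap h := List.mem_flatMap.mpr ⟨a, ha, (PySem.Set.mem_ofList _ y).mp hy⟩
        simp [PySem.Set.mem_ofList, this]
      rw [hnil, List.append_nil, IH, PySem.List.dedup_eq_ofList]
    · rw [PySem.Set.add_of_not_mem (fun hm => ha ((PySem.Set.mem_ofList l a).mp hm))]
      have hall : (PySem.Set.ofList (h a)).filter
          (fun y => !(PySem.Set.contains (PySem.Set.ofList (l.flatMap h)) y))
          = PySem.Set.ofList (h a) := by
        apply List.filter_eq_self.mpr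
        intro y hy
        have hy' : y ∈ h a := (PySem.Set.mem_ofList _ y).mp hy
        have : y ∉ l.flatMap h := by
          intro hmem
          obtain ⟨b, hb, hyb⟩ := List.mem_flatMap.mp hmem
          exact hdisj a b (fun e => ha (e ▸ hb)) y hy' hyb
        simp [PySem.Set.mem_ofList, this]
      rw [hall, IH, PySem.List.dedup_eq_ofList, List.flatMap_append, List.flatMap_singleton]

theorem flatMap_ite {α β : Type} (q : α → Bool) (g : α → List β) (l : List α) :
    (l.flatMap (fun a => if q a then g a else [])) = (l.filter q).flatMap g := by
  induction l with
  | nil => rfl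
  | cons x xs IH =>
    by_cases hq : q x = true <;>
      simp [List.flatMap_cons, hq, IH]

theorem foldl_update {α β : Type} [BEq α] (g : β → List α) (l : List β) (s : PySem.Set α) :
    l.foldl (fun s x => PySem.Set.update s (g x)) s = PySem.Set.update s (l.flatMap g) := by
  induction l generalizing s with
  | nil => simp [PySem.Set.update]
  | cons x xs IH =>
    simp only [List.foldl_cons, List.flatMap_cons, PySem.Set.update_append]
    exact IH _

-- ---------- substP lemmas ----------

theorem length_substP (w : List Char) (q : List (Nat × Char)) :
    (substP w q).length = w.length := by
  induction q generalizing w with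
  | nil => rfl
  | cons pr q IH => simpa [substP, List.foldl_cons] using IH (w.set pr.1 pr.2)

theorem getElem?_substP_not_mem (w : List Char) (q : List (Nat × Char)) (i : Nat)
    (h : ∀ pr ∈ q, pr.1 ≠ i) : (substP w q)[i]? = w[i]? := by
  induction q generalizing w with
  | nil => rfl
  | cons pr q IH =>
    have : (substP (w.set pr.1 pr.2) q)[i]? = (w.set pr.1 pr.2)[i]? :=
      IH _ (fun a ha => h a (List.mem_cons_of_mem _ ha))
    rw [substP, List.foldl_cons]
    rw [show (List.foldl (fun w pr => w.set pr.1 pr.2) (w.set pr.1 pr.2) q) = substP (w.set pr.1 pr.2) q from rfl,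
      this, List.getElem?_set_ne (h pr (List.mem_cons_self) )]

theorem getElem?_substP_mem (w : List Char) (q : List (Nat × Char)) (p : Nat) (s : Char)
    (hnd : (q.map Prod.fst).Nodup) (hmem : (p, s) ∈ q) (hlt : p < w.length) :
    (substP w q)[p]? = some s := by
  induction q generalizing w with
  | nil => cases hmem
  | cons pr q IH =>
    rw [substP, List.foldl_cons,
      show (List.foldl (fun w pr => w.set pr.1 pr.2) (w.set pr.1 pr.2) q) = substP (w.set pr.1 pr.2) q from rfl]
    rcases List.mem_cons.mp hmem with heq | hmem'
    · subst heq
      have hnot : ∀ a ∈ q, a.1 ≠ p := by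
        intro a ha he
        have hnd1 := (List.nodup_cons.mp hnd).1
        have h2 : a.1 ∈ q.map Prod.fst := List.mem_map_of_mem ha
        rw [he] at h2
        exact hnd1 h2
      rw [getElem?_substP_not_mem _ _ _ hnot, List.getElem?_set_self hlt]
    · exact IH _ (List.nodup_cons.mp hnd).2 hmem' (by simpa using hlt)

theorem sublist_of_pairwise_lt (l ps : List Nat) (hl : l.Pairwise (· < ·))
    (hps : ps.Pairwise (· < ·)) (hsub : ∀ x ∈ ps, x ∈ l) : ps.Sublist l := by
  induction l generalizing ps with
  | nil =>
    cases ps with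
    | nil => exact List.Sublist.refl _
    | cons q t => exact absurd (hsub q (List.mem_cons_self)) (List.not_mem_nil)
  | cons x l' IH =>
    cases ps with
    | nil => exact List.nil_sublist _
    | cons q t =>
      by_cases hq : q = x
      · subst hq
        apply List.Sublist.cons₂
        apply IH _ (List.pairwise_cons.mp hl).2 (List.pairwise_cons.mp hps).2
        intro y hy
        have hy' := hsub y (List.mem_cons_of_mem _ hy)
        have hqy : q < y := (List.pairwise_cons.mp hps).1 y hy
        rcases List.mem_cons.mp hy' with rfl | h'
        · omega
        · exact h'
      · apply List.sublist_cons_of_sublist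
        apply IH _ (List.pairwise_cons.mp hl).2 hps
        intro y hy
        have hy' := hsub y hy
        rcases List.mem_cons.mp hy' with rfl | h'
        · exfalso
          have hqmem := hsub q (List.mem_cons_self)
          rcases List.mem_cons.mp hqmem with rfl | hq'
          · exact hq rfl
          · have hxq : y < q := (List.pairwise_cons.mp hl).1 q hq'
            rcases List.mem_cons.mp hy with rfl | hyt
            · exact hq rfl
            · have : q < y := (List.pairwise_cons.mp hps).1 y hyt
              omega
        · exact h'

theorem filter_mem_of_sublist (l ps : List Nat) (hnd : l.Nodup) (hs : ps.Sublist l) :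
    l.filter (fun i => decide (i ∈ ps)) = ps := by
  induction l generalizing ps with
  | nil => simpa using (List.sublist_nil.mp hs).symm
  | cons x l' IH =>
    have hx : x ∉ l' := (List.nodup_cons.mp hnd).1
    have hnd' : l'.Nodup := (List.nodup_cons.mp hnd).2
    rcases List.sublist_cons_iff.mp hs with hs' | ⟨t, rfl, ht⟩
    · have hxps : x ∉ ps := fun hm => hx (hs'.subset hm)
      simp only [List.filter_cons, decide_eq_true_eq]
      rw [if_neg hxps]
      exact IH ps hnd' hs'
    · simp only [List.filter_cons, decide_eq_true_eq]
      rw [if_pos (List.mem_cons_self)]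
      have : l'.filter (fun i => decide (i ∈ x :: t)) = l'.filter (fun i => decide (i ∈ t)) := by
        apply List.filter_congr
        intro y hy
        have hyx : y ≠ x := fun e => hx (e ▸ hy)
        simp [List.mem_cons, hyx]
      rw [this, IH t hnd' ht]

theorem filter_range_eq_of_goodPs (n : Nat) (ps : List Nat) (h : goodPs n ps) :
    (List.range n).filter (fun i => decide (i ∈ ps)) = ps := by
  apply filter_mem_of_sublist _ _ (List.nodup_range)
  exact sublist_of_pairwise_lt _ _ (List.pairwise_lt_range) h.1
    (fun x hx => List.mem_range.mpr (h.2 x hx))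

theorem diffs_substP (cs : List Char) (q : List (Nat × Char))
    (hpw : (q.map Prod.fst).Pairwise (· < ·)) (hb : ∀ pr ∈ q, pr.1 < cs.length)
    (hch : ∀ pr ∈ q, ∀ y, cs[pr.1]? = some y → pr.2 ≠ y) :
    diffs cs (substP cs q) = q.map Prod.fst := by
  have hnd : (q.map Prod.fst).Nodup := hpw.imp (fun h => Nat.ne_of_lt h)
  unfold diffs
  have hcong : ∀ i ∈ List.range cs.length,
      (decide ((substP cs q)[i]? ≠ cs[i]?)) = decide (i ∈ q.map Prod.fst) := by
    intro i hi
    have hilt : i < cs.length := List.mem_range.mp hi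
    by_cases hmem : i ∈ q.map Prod.fst
    · obtain ⟨pr, hpr, hfst⟩ := List.mem_map.mp hmem
      subst hfst
      have hget : (substP cs q)[pr.1]? = some pr.2 :=
        getElem?_substP_mem cs q pr.1 pr.2 hnd (by simpa using hpr) (hb pr hpr)
      have hcs : cs[pr.1]? = some (cs[pr.1]'hilt) := List.getElem?_eq_getElem hilt
      have hne : pr.2 ≠ cs[pr.1]'hilt := hch pr hpr _ hcs
      rw [hget, hcs]
      simp [hne, hmem]
    · have hnot : ∀ pr ∈ q, pr.1 ≠ i := by
        intro pr hpr he
        exact hmem (he ▸ List.mem_map_of_mem hpr)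
      rw [getElem?_substP_not_mem cs q i hnot]
      simp [hmem]
  rw [List.filter_congr hcong, filter_range_eq_of_goodPs cs.length _
    ⟨hpw, fun p hp => by obtain ⟨pr, hpr, rfl⟩ := List.mem_map.mp hp; exact hb pr hpr⟩]

theorem okP_substP (cs alpha : List Char) (q : List (Nat × Char))
    (hnd : (q.map Prod.fst).Nodup) (hb : ∀ pr ∈ q, pr.1 < cs.length)
    (hv : ∀ pr ∈ q, pr.2 ∈ alpha) : okP cs alpha (substP cs q) := by
  refine ⟨length_substP cs q, ?_⟩
  intro i x y hx hy hne
  by_cases hmem : i ∈ q.map Prod.fst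
  · obtain ⟨pr, hpr, hfst⟩ := List.mem_map.mp hmem
    have hpr' : (pr.1, pr.2) ∈ q := by simpa using hpr
    have hget : (substP cs q)[pr.1]? = some pr.2 :=
      getElem?_substP_mem cs q pr.1 pr.2 hnd hpr' (hb pr hpr)
    rw [hfst] at hget
    rw [hget] at hx
    exact (Option.some.injEq _ _ ▸ hx) ▸ hv pr hpr
  · have hnot : ∀ pr ∈ q, pr.1 ≠ i := fun pr hpr he => hmem (he ▸ List.mem_map_of_mem hpr)
    rw [getElem?_substP_not_mem cs q i hnot, hy] at hx
    exact absurd (Option.some.inj hx).symm hne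

-- ---------- prodA / prodF membership ----------

theorem mem_prodA (alpha : List Char) (r : Nat) (ss : List Char) :
    ss ∈ prodA alpha r ↔ ss.length = r ∧ ∀ x ∈ ss, x ∈ alpha := by
  induction r generalizing ss with
  | zero =>
    simp only [prodA, List.mem_singleton]
    constructor
    · rintro rfl; simp
    · rintro ⟨hl, _⟩; exact List.length_eq_zero_iff.mp hl
  | succ r IH =>
    simp only [prodA, List.mem_flatMap, List.mem_map]
    constructor
    · rintro ⟨a, ha, t, ht, rfl⟩
      obtain ⟨hl, hm⟩ := (IH t).mp ht
      refine ⟨by simp [hl], ?_⟩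
      intro x hx
      rcases List.mem_cons.mp hx with rfl | hx
      · exact ha
      · exact hm x hx
    · rintro ⟨hl, hm⟩
      cases ss with
      | nil => simp at hl
      | cons a t =>
        exact ⟨a, hm a (List.mem_cons_self), t, (IH t).mpr ⟨by simpa using hl, fun x hx => hm x (List.mem_cons_of_mem _ hx)⟩, rfl⟩

theorem mem_prodF (ls : List (List Char)) (ss : List Char) :
    ss ∈ prodF ls ↔ List.Forall₂ (fun s l => s ∈ l) ss ls := by
  induction ls generalizing ss with
  | nil =>
    simp only [prodF, List.mem_singleton, List.forall₂_nil_right_iff]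
  | cons l ls IH =>
    simp only [prodF, List.mem_flatMap, List.mem_map]
    constructor
    · rintro ⟨a, ha, t, ht, rfl⟩
      exact List.Forall₂.cons ha ((IH t).mp ht)
    · intro hf
      cases hf with
      | cons ha ht => exact ⟨_, ha, _, (IH _).mpr ht, rfl⟩

-- ---------- comb lemmas ----------

theorem combA_eq_nil_of_lt (l : List Int) (r : Nat) (h : l.length < r) : combA l r = [] := by
  induction l generalizing r with
  | nil =>
    cases r with
    | zero => omega
    | succ r => rfl
  | cons x xs IH =>
    cases r with
    | zero => omega
    | succ r =>
      simp only [combA]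
      rw [IH r (by simpa using h), IH (r + 1) (by simp at h ⊢; omega)]
      rfl

theorem combB_eq_combA (l : List Int) (r : Nat) : combB l r = combA l r := by
  induction l generalizing r with
  | nil =>
    cases r with
    | zero => rfl
    | succ r => rfl
  | cons x xs IH =>
    cases r with
    | zero => rfl
    | succ r =>
      simp only [combB]
      by_cases hlen : (x :: xs).length < r + 1
      · rw [if_pos hlen, combA_eq_nil_of_lt _ _ hlen]
      · rw [if_neg hlen]
        simp only [combA, IH]

theorem combA_map_cast (l : List Nat) (r : Nat) :
    combA (l.map (Nat.cast : Nat → Int)) r = (combN l r).map (List.map (Nat.cast : Nat → Int)) := by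
  induction l generalizing r with
  | nil =>
    cases r with
    | zero => rfl
    | succ r => rfl
  | cons x xs IH =>
    cases r with
    | zero => rfl
    | succ r =>
      simp only [List.map_cons, combA, combN, IH, List.map_append, List.map_map]
      rfl

theorem mem_combN (l : List Nat) (r : Nat) (ps : List Nat) :
    ps ∈ combN l r ↔ ps.Sublist l ∧ ps.length = r := by
  induction l generalizing r ps with
  | nil =>
    cases r with
    | zero =>
      simp only [combN, List.mem_singleton]
      constructor
      · rintro rfl; exact ⟨List.Sublist.refl _, rfl⟩
      · rintro ⟨hs, _⟩; exact List.sublist_nil.mp hs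
    | succ r =>
      simp only [combN, List.not_mem_nil, false_iff]
      rintro ⟨hs, hl⟩
      have := List.sublist_nil.mp hs
      subst this
      simp at hl
  | cons x xs IH =>
    cases r with
    | zero =>
      simp only [combN, List.mem_singleton]
      constructor
      · rintro rfl; exact ⟨List.nil_sublist _, rfl⟩
      · rintro ⟨hs, hl⟩; exact List.length_eq_zero_iff.mp hl
    | succ r =>
      simp only [combN, List.mem_append, List.mem_map]
      constructor
      · rintro (⟨t, ht, rfl⟩ | hmem)
        · obtain ⟨hs, hl⟩ := (IH r t).mp ht
          exact ⟨List.Sublist.cons₂ x hs, by simp [hl]⟩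
        · obtain ⟨hs, hl⟩ := (IH (r + 1) ps).mp hmem
          exact ⟨List.sublist_cons_of_sublist x hs, hl⟩
      · rintro ⟨hs, hl⟩
        rcases List.sublist_cons_iff.mp hs with hs' | ⟨t, rfl, ht⟩
        · exact Or.inr ((IH (r + 1) ps).mpr ⟨hs', hl⟩)
        · exact Or.inl ⟨t, (IH r t).mpr ⟨ht, by simpa using hl⟩, rfl⟩

theorem nodup_combN (l : List Nat) (r : Nat) (h : l.Nodup) : (combN l r).Nodup := by
  induction l generalizing r with
  | nil =>
    cases r with
    | zero => simp [combN]
    | succ r => simp [combN]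
  | cons x xs IH =>
    cases r with
    | zero => simp [combN]
    | succ r =>
      have hx : x ∉ xs := (List.nodup_cons.mp h).1
      have hxs : xs.Nodup := (List.nodup_cons.mp h).2
      simp only [combN]
      apply List.Nodup.append
      · exact (IH r hxs).map (fun a b hab => by simpa using hab)
      · exact IH (r + 1) hxs
      · intro y hy hy'
        obtain ⟨t, _, rfl⟩ := List.mem_map.mp hy
        have := ((mem_combN xs (r + 1) (x :: t)).mp hy').1
        exact hx (this.subset (List.mem_cons_self))

theorem combN_eq_nil_of_lt (l : List Nat) (r : Nat) (h : l.length < r) : combN l r = [] := by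
  apply List.eq_nil_iff_forall_not_mem.mpr
  intro ps hps
  have hm := (mem_combN l r ps).mp hps
  have := hm.1.length_le
  omega

-- ---------- bridging wordA / fillB ----------

theorem wordA_foldl_eq_substP (cs : List Char) (zb : List (Nat × Char)) (w : List Char) :
    (zb.map (fun pr => ((pr.1 : Int), pr.2))).foldl
      (fun w pr => if pr.2 ≠ PySem.List.pyGetD cs pr.1 ' ' then PySem.List.pySetD w pr.1 pr.2 else w) w
      = substP w (zb.filter (fun pr => pr.2 != cs.getD pr.1 ' ')) := by
  induction zb generalizing w with
  | nil => rfl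
  | cons pr zb IH =>
    obtain ⟨p, s⟩ := pr
    simp only [List.map_cons, List.foldl_cons, List.filter_cons]
    rw [PySem.List.pyGetD_natCast, PySem.List.pySetD_natCast]
    by_cases hs : s = cs.getD p ' '
    · simp only [hs, ne_eq, not_true_eq_false, if_false, bne_self_eq_false]
      exact IH w
    · simp only [ne_eq, hs, not_false_eq_true, if_true, bne_iff_ne]
      rw [show substP w ((p, s) :: List.filter (fun pr => pr.2 != cs.getD pr.1 ' ') zb)
          = substP (w.set p s) (List.filter (fun pr => pr.2 != cs.getD pr.1 ' ') zb) from rfl]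
      exact IH (w.set p s)

theorem wordA_eq_substP (cs : List Char) (psn : List Nat) (ss : List Char) :
    wordA cs (psn.map (Nat.cast : Nat → Int)) ss
      = substP cs ((psn.zip ss).filter (fun pr => pr.2 != cs.getD pr.1 ' ')) := by
  unfold wordA
  rw [List.zip_map_left]
  rw [show (psn.zip ss).map (Prod.map (Nat.cast : Nat → Int) id)
      = (psn.zip ss).map (fun pr => ((pr.1 : Int), pr.2)) from by
    apply List.map_congr_left; intro a _; cases a; rfl]
  exact wordA_foldl_eq_substP cs (psn.zip ss) cs

theorem fillB_eq_map_prodF (cs alpha : List Char) (psn : List Nat) (w : List Char)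
    (hb : ∀ p ∈ psn, p < cs.length) :
    fillB (ALW cs alpha) w (psn.map (Nat.cast : Nat → Int))
      = (prodF (psn.map (aAt cs alpha))).map (fun ss => String.ofList (substP w (psn.zip ss))) := by
  induction psn generalizing w with
  | nil => rfl
  | cons p ps IH =>
    have hp : p < cs.length := hb p (List.mem_cons_self)
    have hget : PySem.List.pyGetD (ALW cs alpha) (p : Int) [] = aAt cs alpha p := by
      rw [PySem.List.pyGetD_natCast]
      unfold ALW aAt
      rw [List.getD_eq_getElem?_getD, List.getElem?_map, List.getElem?_eq_getElem hp]
      simp [List.getD_eq_getElem?_getD, List.getElem?_eq_getElem hp]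
    simp only [List.map_cons, fillB, hget, prodF, List.map_flatMap, PySem.List.pySetD_natCast]
    refine congrArg (fun f => List.flatMap f (aAt cs alpha p)) (funext fun a => ?_)
    rw [IH (w.set p a) (fun q hq => hb q (List.mem_cons_of_mem _ hq)), List.map_map]
    rfl

-- ---------- block characterization ----------

theorem forall2_zip_values (cs alpha : List Char) (psn : List Nat) (ss : List Char)
    (hf : List.Forall₂ (fun s l => s ∈ l) ss (psn.map (aAt cs alpha))) :
    ∀ pr ∈ psn.zip ss, pr.2 ∈ aAt cs alpha pr.1 := by
  induction psn generalizing ss with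
  | nil => intro pr hpr; simp at hpr
  | cons p ps IH =>
    cases ss with
    | nil => intro pr hpr; simp at hpr
    | cons a t =>
      cases hf with
      | cons ha ht =>
        intro pr hpr
        rcases List.mem_cons.mp hpr with rfl | hpr'
        · exact ha
        · exact IH t ht pr hpr'

theorem zip_map_self (psn : List Nat) (g : Nat → Char) :
    psn.zip (psn.map g) = psn.map (fun p => (p, g p)) := by
  induction psn with
  | nil => rfl
  | cons p ps IH => simp [List.zip_cons_cons, IH]

theorem forall2_map_self (psn : List Nat) (g : Nat → Char) (h : Nat → List Char)
    (hm : ∀ p ∈ psn, g p ∈ h p) :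
    List.Forall₂ (fun s l => s ∈ l) (psn.map g) (psn.map h) := by
  induction psn with
  | nil => exact List.Forall₂.nil
  | cons p ps IH =>
    exact List.Forall₂.cons (hm p (List.mem_cons_self))
      (IH (fun q hq => hm q (List.mem_cons_of_mem _ hq)))

theorem aAt_mem_iff (cs alpha : List Char) (p : Nat) (s : Char) :
    s ∈ aAt cs alpha p ↔ s ∈ alpha ∧ s ≠ cs.getD p ' ' := by
  unfold aAt
  rw [List.mem_filter]
  simp

theorem mem_bblock (cs alpha : List Char) (psn : List Nat) (hg : goodPs cs.length psn) (w : String) :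
    w ∈ bblock cs alpha psn ↔
      ∃ wl, w = String.ofList wl ∧ wl.length = cs.length ∧ okP cs alpha wl ∧ diffs cs wl = psn := by
  have hnd : psn.Nodup := hg.1.imp (fun h => Nat.ne_of_lt h)
  unfold bblock
  rw [fillB_eq_map_prodF cs alpha psn cs hg.2]
  rw [List.mem_map]
  constructor
  · rintro ⟨ss, hss, rfl⟩
    have hf := (mem_prodF _ ss).mp hss
    have hlen : ss.length = psn.length := by
      have := List.Forall₂.length_eq hf; simpa using this
    have hkeys : (psn.zip ss).map Prod.fst = psn := List.map_fst_zip (by omega)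
    have hv := forall2_zip_values cs alpha psn ss hf
    have hbd : ∀ pr ∈ psn.zip ss, pr.1 < cs.length := by
      intro pr hpr
      exact hg.2 pr.1 (List.of_mem_zip (by simpa using hpr)).1
    refine ⟨substP cs (psn.zip ss), rfl, length_substP _ _, ?_, ?_⟩
    · apply okP_substP
      · rw [hkeys]; exact hnd
      · exact hbd
      · intro pr hpr
        exact ((aAt_mem_iff cs alpha pr.1 pr.2).mp (hv pr hpr)).1
    · rw [diffs_substP]
      · exact hkeys
      · rw [hkeys]; exact hg.1
      · exact hbd
      · intro pr hpr y hy
        have hv' := ((aAt_mem_iff cs alpha pr.1 pr.2).mp (hv pr hpr)).2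
        have hplt : pr.1 < cs.length := hbd pr hpr
        have hcgetd : cs.getD pr.1 ' ' = cs[pr.1]'hplt := by
          rw [List.getD_eq_getElem?_getD, List.getElem?_eq_getElem hplt]; rfl
        rw [List.getElem?_eq_getElem hplt] at hy
        have hyv : y = cs[pr.1]'hplt := (Option.some.inj hy).symm
        subst hyv
        exact fun he => hv' (by rw [he, hcgetd])
  · rintro ⟨wl, rfl, hlen, hok, hdif⟩
    refine ⟨psn.map (fun p => wl.getD p ' '), ?_, ?_⟩
    · rw [mem_prodF]
      apply forall2_map_self
      intro p hp
      have hplt : p < cs.length := hg.2 p hp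
      have hwlt : p < wl.length := by omega
      have hpdif : p ∈ diffs cs wl := hdif ▸ hp
      have hne : wl[p]? ≠ cs[p]? := by
        have := List.mem_filter.mp hpdif
        simpa using this.2
      have hgetd : wl.getD p ' ' = wl[p]'hwlt := by
        rw [List.getD_eq_getElem?_getD, List.getElem?_eq_getElem hwlt]; rfl
      have hcgetd : cs.getD p ' ' = cs[p]'hplt := by
        rw [List.getD_eq_getElem?_getD, List.getElem?_eq_getElem hplt]; rfl
      have hnev : wl[p]'hwlt ≠ cs[p]'hplt := by
        intro he
        apply hne
        rw [List.getElem?_eq_getElem hwlt, List.getElem?_eq_getElem hplt, he]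
      rw [aAt_mem_iff]
      constructor
      · rw [hgetd]
        exact hok.2 p _ _ (List.getElem?_eq_getElem hwlt) (List.getElem?_eq_getElem hplt) hnev
      · rw [hgetd, hcgetd]; exact hnev
    · rw [zip_map_self]
      congr 1
      apply List.ext_getElem?
      intro i
      by_cases hmem : i ∈ psn
      · have hilt : i < cs.length := hg.2 i hmem
        have hiwl : i < wl.length := by omega
        have hmm : (i, wl.getD i ' ') ∈ psn.map (fun p => (p, wl.getD p ' ')) := List.mem_map_of_mem hmem
        rw [getElem?_substP_mem cs _ i (wl.getD i ' ') (by
            rw [show (psn.map (fun p => (p, wl.getD p ' '))).map Prod.fst = psn from by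
              rw [List.map_map]; simp [Function.comp_def]]
            exact hnd) hmm hilt]
        rw [List.getElem?_eq_getElem hiwl]
        rw [List.getD_eq_getElem?_getD, List.getElem?_eq_getElem hiwl]
        rfl
      · rw [getElem?_substP_not_mem cs _ i (by
          intro pr hpr he
          obtain ⟨pq, hpq, rfl⟩ := List.mem_map.mp hpr
          exact hmem (he ▸ hpq))]
        by_cases hilt : i < cs.length
        · have hidif : i ∉ diffs cs wl := hdif ▸ hmem
          have hnn : ¬ (wl[i]? ≠ cs[i]?) := by
            intro hne
            exact hidif (List.mem_filter.mpr ⟨List.mem_range.mpr hilt, by simpa using hne⟩)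
          exact (not_not.mp hnn).symm
        · rw [List.getElem?_eq_none (by omega : wl.length ≤ i), List.getElem?_eq_none (by omega : cs.length ≤ i)]

theorem prodF_filter_key (cs alpha : List Char) (psn : List Nat) :
    PySem.Set.ofList ((prodA alpha psn.length).filter (allb cs psn)) = prodF (psn.map (aAt cs alpha)) := by
  induction psn with
  | nil =>
    have : (prodA alpha 0).filter (allb cs []) = [[]] := by
      simp [prodA, allb]
    rw [List.length_nil, this]
    rfl
  | cons p ps IH =>
    have hstep : (prodA alpha (p :: ps).length).filter (allb cs (p :: ps))
        = alpha.flatMap (fun a => if a != cs.getD p ' '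
            then ((prodA alpha ps.length).filter (allb cs ps)).map (a :: ·) else []) := by
      rw [show (p :: ps).length = ps.length + 1 from rfl]
      simp only [prodA, List.filter_flatMap, List.filter_map]
      refine congrArg (fun f => List.flatMap f alpha) (funext fun a => ?_)
      by_cases ha : a = cs.getD p ' '
      · have hhd : (a != cs.getD p ' ') = false := by simp [ha]
        have hfun : (allb cs (p :: ps) ∘ (a :: ·)) = fun _ => false := by
          funext ss
          show allb cs (p :: ps) (a :: ss) = false
          rw [show allb cs (p :: ps) (a :: ss) = ((a != cs.getD p ' ') && allb cs ps ss) from rfl,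
            hhd, Bool.false_and]
        rw [hfun, List.filter_false, List.map_nil, hhd]
        rfl
      · have hhd : (a != cs.getD p ' ') = true := by simpa using ha
        have hfun : (allb cs (p :: ps) ∘ (a :: ·)) = allb cs ps := by
          funext ss
          show allb cs (p :: ps) (a :: ss) = allb cs ps ss
          rw [show allb cs (p :: ps) (a :: ss) = ((a != cs.getD p ' ') && allb cs ps ss) from rfl,
            hhd, Bool.true_and]
        rw [hfun, hhd]
        rfl
    rw [hstep, ofList_flatMap_disjoint]
    · have harm : ∀ a, PySem.Set.ofList (if a != cs.getD p ' '
          then ((prodA alpha ps.length).filter (allb cs ps)).map (a :: ·) else [])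
          = (if a != cs.getD p ' ' then (prodF (ps.map (aAt cs alpha))).map (a :: ·) else []) := by
        intro a
        by_cases ha : a = cs.getD p ' '
        · simp [ha]
        · rw [if_pos (by simpa using ha), if_pos (by simpa using ha)]
          rw [ofList_map_injOn _ _ (fun x _ y _ h => by simpa using h), IH]
      have hmid : (PySem.List.dedup alpha).flatMap (fun a => PySem.Set.ofList (if a != cs.getD p ' '
          then ((prodA alpha ps.length).filter (allb cs ps)).map (a :: ·) else []))
          = (PySem.List.dedup alpha).flatMap (fun a => if a != cs.getD p ' '
            then (prodF (ps.map (aAt cs alpha))).map (a :: ·) else []) := by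
        exact congrArg (fun f => List.flatMap f (PySem.List.dedup alpha)) (funext harm)
      rw [hmid, flatMap_ite]
      have hfeq : (PySem.List.dedup alpha).filter (fun a => a != cs.getD p ' ')
          = aAt cs alpha p := by
        unfold aAt
        apply List.filter_congr
        intro a _
        simp only [decide_not]
        rfl
      rw [hfeq]
      rfl
    · intro a b hab x hxa hxb
      split_ifs at hxa hxb with h1 h2 <;> try simp at hxa hxb
      obtain ⟨t, _, rfl⟩ := hxa
      obtain ⟨t', _, he⟩ := hxb
      exact hab (by simpa using congrArg (fun l => l.headD ' ') he.symm)

-- ---------- per-block and schedule induction ----------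

theorem substP_zip_inj (cs : List Char) (psn : List Nat) (ss ss' : List Char)
    (hnd : psn.Nodup) (hb : ∀ p ∈ psn, p < cs.length)
    (h1 : ss.length = psn.length) (h2 : ss'.length = psn.length)
    (heq : substP cs (psn.zip ss) = substP cs (psn.zip ss')) : ss = ss' := by
  apply List.ext_getElem (by omega)
  intro j hj hj'
  have hjp : j < psn.length := by omega
  have hkeys : (psn.zip ss).map Prod.fst = psn := List.map_fst_zip (by omega)
  have hkeys' : (psn.zip ss').map Prod.fst = psn := List.map_fst_zip (by omega)
  have hm1 : (psn[j], ss[j]) ∈ psn.zip ss := by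
    have hz : j < (psn.zip ss).length := by rw [List.length_zip]; omega
    have := List.getElem_zip (l := psn) (l' := ss) (i := j) (h := hz)
    exact this ▸ List.getElem_mem hz
  have hm2 : (psn[j], ss'[j]) ∈ psn.zip ss' := by
    have hz : j < (psn.zip ss').length := by rw [List.length_zip]; omega
    have := List.getElem_zip (l := psn) (l' := ss') (i := j) (h := hz)
    exact this ▸ List.getElem_mem hz
  have g1 : (substP cs (psn.zip ss))[psn[j]]? = some ss[j] :=
    getElem?_substP_mem cs _ _ _ (by rw [hkeys]; exact hnd) hm1 (hb _ (List.getElem_mem hjp))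
  have g2 : (substP cs (psn.zip ss'))[psn[j]]? = some ss'[j] :=
    getElem?_substP_mem cs _ _ _ (by rw [hkeys']; exact hnd) hm2 (hb _ (List.getElem_mem hjp))
  rw [heq, g2] at g1
  exact (Option.some.inj g1).symm

theorem per_block (cs alpha : List Char) (psn : List Nat) (S : List String)
    (hg : goodPs cs.length psn)
    (Hold : ∀ wl, wl.length = cs.length → okP cs alpha wl → (diffs cs wl).length < psn.length →
      String.ofList wl ∈ S)
    (Hthis : ∀ wl, wl.length = cs.length → okP cs alpha wl → diffs cs wl = psn →
      String.ofList wl ∉ S) :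
    PySem.Set.update S (ablock cs alpha psn) = S ++ bblock cs alpha psn := by
  have hnd : psn.Nodup := hg.1.imp (fun h => Nat.ne_of_lt h)
  rw [PySem.Set.update_eq_append_filter]
  congr 1
  unfold ablock
  rw [filter_ofList, List.filter_map]
  have hword : ∀ ss, wordA cs (psn.map (Nat.cast : Nat → Int)) ss
      = substP cs ((psn.zip ss).filter (fun pr => pr.2 != cs.getD pr.1 ' ')) :=
    fun ss => wordA_eq_substP cs psn ss
  have hq_facts : ∀ ss, ss.length = psn.length → (∀ x ∈ ss, x ∈ alpha) →
      ((((psn.zip ss).filter (fun pr => pr.2 != cs.getD pr.1 ' ')).map Prod.fst).Pairwise (· < ·)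
        ∧ (∀ pr ∈ (psn.zip ss).filter (fun pr => pr.2 != cs.getD pr.1 ' '), pr.1 < cs.length)
        ∧ (∀ pr ∈ (psn.zip ss).filter (fun pr => pr.2 != cs.getD pr.1 ' '), pr.2 ∈ alpha)) := by
    intro ss hlen hmem
    have hzk : (psn.zip ss).map Prod.fst = psn := List.map_fst_zip (by omega)
    have hsub : (((psn.zip ss).filter (fun pr => pr.2 != cs.getD pr.1 ' ')).map Prod.fst).Sublist psn := by
      have h1 : ((psn.zip ss).filter (fun pr => pr.2 != cs.getD pr.1 ' ')).Sublist (psn.zip ss) :=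
        List.filter_sublist
      have h2 := h1.map Prod.fst
      rw [hzk] at h2
      exact h2
    refine ⟨hg.1.sublist hsub, ?_, ?_⟩
    · intro pr hpr
      exact hg.2 pr.1 (hsub.subset (List.mem_map_of_mem hpr))
    · intro pr hpr
      exact hmem pr.2 (List.of_mem_zip (by simpa using List.mem_of_mem_filter hpr)).2
  have hcong : ∀ ss ∈ prodA alpha psn.length,
      ((fun y => !(PySem.Set.contains S y)) ∘ (Fw cs psn)) ss = allb cs psn ss := by
    intro ss hss
    obtain ⟨hlen, hmem⟩ := (mem_prodA alpha psn.length ss).mp hss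
    obtain ⟨hqpw, hqb, hqv⟩ := hq_facts ss hlen hmem
    have hwl : okP cs alpha (substP cs ((psn.zip ss).filter (fun pr => pr.2 != cs.getD pr.1 ' '))) :=
      okP_substP cs alpha _ (hqpw.imp (fun h => Nat.ne_of_lt h)) hqb hqv
    have hdif : diffs cs (substP cs ((psn.zip ss).filter (fun pr => pr.2 != cs.getD pr.1 ' ')))
        = ((psn.zip ss).filter (fun pr => pr.2 != cs.getD pr.1 ' ')).map Prod.fst := by
      apply diffs_substP cs _ hqpw hqb
      intro pr hpr y hy
      have hplt : pr.1 < cs.length := hqb pr hpr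
      have hcgetd : cs.getD pr.1 ' ' = cs[pr.1]'hplt := by
        rw [List.getD_eq_getElem?_getD, List.getElem?_eq_getElem hplt]; rfl
      have hpf := List.of_mem_filter hpr
      rw [List.getElem?_eq_getElem hplt] at hy
      have : y = cs[pr.1]'hplt := (Option.some.inj hy).symm
      subst this
      intro he
      rw [← hcgetd] at he
      simp [he] at hpf
    by_cases hall : allb cs psn ss = true
    · have hfe : (psn.zip ss).filter (fun pr => pr.2 != cs.getD pr.1 ' ') = psn.zip ss :=
        List.filter_eq_self.mpr (fun pr hpr => by
          have := List.all_eq_true.mp hall pr hpr; simpa using this)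
      have hzk : (psn.zip ss).map Prod.fst = psn := List.map_fst_zip (by omega)
      have hnotin : Fw cs psn ss ∉ S := by
        unfold Fw
        rw [hword ss]
        apply Hthis _ (length_substP _ _) hwl
        rw [hdif, hfe, hzk]
      rw [hall, Function.comp_apply]
      simp only [Bool.not_eq_true']
      rw [← Bool.not_eq_true]
      intro hc
      exact hnotin ((PySem.Set.contains_iff S _).mp hc)
    · have hne : (psn.zip ss).filter (fun pr => pr.2 != cs.getD pr.1 ' ') ≠ psn.zip ss := by
        intro he
        apply hall
        apply List.all_eq_true.mpr
        intro pr hpr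
        have := List.filter_eq_self.mp he pr hpr
        simpa using this
      have hlt : ((psn.zip ss).filter (fun pr => pr.2 != cs.getD pr.1 ' ')).length < psn.length := by
        have hsub := List.filter_sublist (l := psn.zip ss) (p := fun pr => pr.2 != cs.getD pr.1 ' ')
        have hle := hsub.length_le
        have hzl : (psn.zip ss).length = psn.length := by rw [List.length_zip]; omega
        rcases Nat.lt_or_ge ((psn.zip ss).filter (fun pr => pr.2 != cs.getD pr.1 ' ')).length (psn.zip ss).length with h | h
        · omega
        · exact absurd (hsub.eq_of_length (by omega)) hne
      have hin : Fw cs psn ss ∈ S := by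
        unfold Fw
        rw [hword ss]
        apply Hold _ (length_substP _ _) hwl
        rw [hdif]
        simpa using hlt
      rw [Function.comp_apply]
      have hc : PySem.Set.contains S (Fw cs psn ss) = true := (PySem.Set.contains_iff S _).mpr hin
      rw [hc]
      simp only [Bool.not_true]
      exact (Bool.eq_false_iff.mpr (fun he => hall he)).symm ▸ rfl
  rw [List.filter_congr hcong]
  have hinj : ∀ x ∈ (prodA alpha psn.length).filter (allb cs psn),
      ∀ y ∈ (prodA alpha psn.length).filter (allb cs psn), Fw cs psn x = Fw cs psn y → x = y := by
    intro x hx y hy hfw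
    have hxall := List.of_mem_filter hx
    have hyall := List.of_mem_filter hy
    have hxlen := ((mem_prodA alpha psn.length x).mp (List.mem_of_mem_filter hx)).1
    have hylen := ((mem_prodA alpha psn.length y).mp (List.mem_of_mem_filter hy)).1
    have hfx : (psn.zip x).filter (fun pr => pr.2 != cs.getD pr.1 ' ') = psn.zip x :=
      List.filter_eq_self.mpr (fun pr hpr => by
        have := List.all_eq_true.mp hxall pr hpr; simpa using this)
    have hfy : (psn.zip y).filter (fun pr => pr.2 != cs.getD pr.1 ' ') = psn.zip y :=
      List.filter_eq_self.mpr (fun pr hpr => by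
        have := List.all_eq_true.mp hyall pr hpr; simpa using this)
    unfold Fw at hfw
    rw [hword x, hword y, hfx, hfy] at hfw
    have := congrArg String.toList hfw
    simp only [String.toList_ofList] at this
    exact substP_zip_inj cs psn x y hnd hg.2 hxlen hylen this
  rw [ofList_map_injOn _ _ hinj, prodF_filter_key cs alpha psn]
  unfold bblock
  rw [fillB_eq_map_prodF cs alpha psn cs hg.2]
  apply List.map_congr_left
  intro ss hss
  have hv := forall2_zip_values cs alpha psn ss ((mem_prodF _ ss).mp hss)
  have hfe : (psn.zip ss).filter (fun pr => pr.2 != cs.getD pr.1 ' ') = psn.zip ss :=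
    List.filter_eq_self.mpr (fun pr hpr => by
      have := ((aAt_mem_iff cs alpha pr.1 pr.2).mp (hv pr hpr)).2
      simpa using this)
  unfold Fw
  rw [hword ss, hfe]

theorem inner_level (cs alpha : List Char) (r : Nat) (L : List (List Nat)) (S : List String)
    (hS : S.Nodup) (hLnd : L.Nodup)
    (hLg : ∀ ps ∈ L, goodPs cs.length ps ∧ ps.length = r)
    (Hold : ∀ wl, wl.length = cs.length → okP cs alpha wl → (diffs cs wl).length < r →
      String.ofList wl ∈ S)
    (Hnew : ∀ wl, wl.length = cs.length → okP cs alpha wl → diffs cs wl ∈ L →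
      String.ofList wl ∉ S) :
    PySem.Set.update S (L.flatMap (ablock cs alpha)) = S ++ L.flatMap (bblock cs alpha)
      ∧ (S ++ L.flatMap (bblock cs alpha)).Nodup := by
  induction L generalizing S with
  | nil =>
    constructor
    · show PySem.Set.update S [] = S ++ List.flatMap (bblock cs alpha) []
      rw [List.flatMap_nil, List.append_nil]
      rfl
    · rw [List.flatMap_nil, List.append_nil]; exact hS
  | cons ps L' IH =>
    have hgps := (hLg ps (List.mem_cons_self)).1
    have hlps := (hLg ps (List.mem_cons_self)).2
    have hpb : PySem.Set.update S (ablock cs alpha ps) = S ++ bblock cs alpha ps := by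
      apply per_block cs alpha ps S hgps
      · intro wl h1 h2 h3
        exact Hold wl h1 h2 (by omega)
      · intro wl h1 h2 h3
        exact Hnew wl h1 h2 (h3 ▸ List.mem_cons_self)
    have hS' : (S ++ bblock cs alpha ps).Nodup := by
      rw [← hpb]
      exact PySem.Set.nodup_update S _ hS
    have hnotmem : ∀ wl, wl.length = cs.length → okP cs alpha wl → diffs cs wl ∈ L' →
        String.ofList wl ∉ S ++ bblock cs alpha ps := by
      intro wl h1 h2 h3
      rw [List.mem_append]
      rintro (hin | hin)
      · exact Hnew wl h1 h2 (List.mem_cons_of_mem _ h3) hin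
      · obtain ⟨wl', he, _, _, hdif'⟩ := (mem_bblock cs alpha ps hgps _).mp hin
        have : wl = wl' := by
          have := congrArg String.toList he
          simpa using this
        subst this
        rw [hdif'] at h3
        exact (List.nodup_cons.mp hLnd).1 h3
    have hIH := IH (S ++ bblock cs alpha ps) hS' (List.nodup_cons.mp hLnd).2
      (fun q hq => hLg q (List.mem_cons_of_mem _ hq))
      (fun wl h1 h2 h3 => List.mem_append_left _ (Hold wl h1 h2 h3))
      hnotmem
    constructor
    · rw [List.flatMap_cons, PySem.Set.update_append, hpb, hIH.1, List.flatMap_cons,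
        List.append_assoc]
    · rw [List.flatMap_cons, ← List.append_assoc]
      exact hIH.2

theorem outer_levels (cs alpha : List Char) (m k : Nat) (S : List String)
    (hS : S.Nodup)
    (Hold : ∀ wl, wl.length = cs.length → okP cs alpha wl → (diffs cs wl).length < k →
      String.ofList wl ∈ S)
    (Hnotyet : ∀ wl, wl.length = cs.length → okP cs alpha wl → k ≤ (diffs cs wl).length →
      String.ofList wl ∉ S) :
    PySem.Set.update S ((List.range' k m).flatMap (aLevelN cs alpha))
      = S ++ (List.range' k m).flatMap (bLevelN cs alpha) := by
  induction m generalizing k S with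
  | zero =>
    simp only [List.range'_zero, List.flatMap_nil, List.append_nil]
    rfl
  | succ m IH =>
    rw [List.range'_succ, List.flatMap_cons, List.flatMap_cons, PySem.Set.update_append]
    have hLg : ∀ ps ∈ combN (List.range cs.length) k, goodPs cs.length ps ∧ ps.length = k := by
      intro ps hps
      obtain ⟨hsub, hlen⟩ := (mem_combN _ _ ps).mp hps
      exact ⟨⟨List.pairwise_lt_range.sublist hsub, fun p hp => List.mem_range.mp (hsub.subset hp)⟩, hlen⟩
    have hinner := inner_level cs alpha k (combN (List.range cs.length) k) S hS
      (nodup_combN _ _ (List.nodup_range)) hLg Hold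
      (fun wl h1 h2 h3 => Hnotyet wl h1 h2 (Nat.le_of_eq ((hLg _ h3).2).symm))
    have hstep : PySem.Set.update S (aLevelN cs alpha k) = S ++ bLevelN cs alpha k := hinner.1
    have hS' : (S ++ bLevelN cs alpha k).Nodup := hinner.2
    have Hold' : ∀ wl, wl.length = cs.length → okP cs alpha wl → (diffs cs wl).length < k + 1 →
        String.ofList wl ∈ S ++ bLevelN cs alpha k := by
      intro wl h1 h2 h3
      rcases Nat.lt_or_ge (diffs cs wl).length k with hlt | hge
      · exact List.mem_append_left _ (Hold wl h1 h2 hlt)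
      · have hk : (diffs cs wl).length = k := by omega
        apply List.mem_append_right
        have hcomb : diffs cs wl ∈ combN (List.range cs.length) k := by
          apply (mem_combN _ _ _).mpr
          refine ⟨?_, hk⟩
          unfold diffs
          exact List.filter_sublist
        apply List.mem_flatMap.mpr
        refine ⟨diffs cs wl, hcomb, ?_⟩
        exact (mem_bblock cs alpha _ (hLg _ hcomb).1 _).mpr ⟨wl, rfl, h1, h2, rfl⟩
    have Hnotyet' : ∀ wl, wl.length = cs.length → okP cs alpha wl → k + 1 ≤ (diffs cs wl).length →
        String.ofList wl ∉ S ++ bLevelN cs alpha k := by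
      intro wl h1 h2 h3
      rw [List.mem_append]
      rintro (hin | hin)
      · exact Hnotyet wl h1 h2 (by omega) hin
      · obtain ⟨ps, hps, hinb⟩ := List.mem_flatMap.mp hin
        obtain ⟨wl', he, _, _, hdif'⟩ := (mem_bblock cs alpha ps (hLg _ hps).1 _).mp hinb
        have : wl = wl' := by
          have := congrArg String.toList he
          simpa using this
        subst this
        rw [hdif'] at h3
        have := (hLg _ hps).2
        omega
    rw [hstep, IH (k + 1) (S ++ bLevelN cs alpha k) hS' Hold' Hnotyet', List.append_assoc]

-- ---------- assembling the two ports ----------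

theorem hamming_sphere_eq_ofList (center : String) (radius : Int) (alphabet : String) :
    hamming_sphere center radius alphabet
      = PySem.Set.ofList ((List.range (radius + 1).toNat).flatMap
          (aLevelN center.toList alphabet.toList)) := by
  unfold hamming_sphere
  simp only [← PySem.Set.update_map_eq_foldl_add, foldl_update]
  rw [show (PySem.Set.empty : PySem.Set String) = [] from rfl, PySem.Set.update_nil_left]
  simp only [PySem.Str.len_eq, PySem.List.pyRange_zero, Int.toNat_natCast, List.flatMap_map]
  congr 1
  apply List.flatMap_congr
  intro k _
  simp only [combA_map_cast, List.flatMap_map]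
  apply List.flatMap_congr
  intro psn hpsn
  have hlen : psn.length = k := ((mem_combN _ _ psn).mp hpsn).2
  unfold ablock Fw
  rw [hlen]

theorem hamming_sphere_alt_eq_ofList (center : String) (radius : Int) (alphabet : String) :
    hamming_sphere_alt center radius alphabet
      = PySem.Set.ofList ((List.range (min radius (center.toList.length : Int) + 1).toNat).flatMap
          (bLevelN center.toList alphabet.toList)) := by
  unfold hamming_sphere_alt
  simp only [PySem.List.foldl_append_eq_flatMap]
  rw [List.nil_append]
  simp only [PySem.Str.len_eq, PySem.List.pyRange_zero, Int.toNat_natCast, List.flatMap_map,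
    combB_eq_combA, combA_map_cast]
  rfl

-- ===== VERDICT (by name: the statement is the Claim_ definition above) =====
theorem hamming_sphere_spec : Claim_equal_hamming_sphere := by
  unfold Claim_equal_hamming_sphere Spec_hamming_sphere
  intro center radius alphabet _
  set cs := center.toList with hcs
  set alpha := alphabet.toList with halpha
  set n := cs.length with hn
  set M := (min radius (n : Int) + 1).toNat with hM
  set R := (radius + 1).toNat with hR
  have hMR : M ≤ R := by
    have h1 : min radius (n : Int) ≤ radius := min_le_left _ _
    omega
  have hmain : PySem.Set.ofList ((List.range M).flatMap (aLevelN cs alpha))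
      = (List.range M).flatMap (bLevelN cs alpha) := by
    have houter := outer_levels cs alpha M 0 [] (List.nodup_nil)
      (fun wl _ _ h => absurd h (Nat.not_lt_zero _))
      (fun wl _ _ _ => List.not_mem_nil)
    rw [List.range_eq_range', ← PySem.Set.update_nil_left]
    simpa using houter
  have htrunc : (List.range R).flatMap (aLevelN cs alpha)
      = (List.range M).flatMap (aLevelN cs alpha) := by
    have hsplit : List.range R = List.range' 0 M ++ List.range' M (R - M) := by
      rw [List.range_eq_range', show R = M + (R - M) from by omega, ← List.range'_append]
      simp
    rw [hsplit, List.flatMap_append]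
    have hnil : (List.range' M (R - M)).flatMap (aLevelN cs alpha) = [] := by
      apply List.flatMap_eq_nil_iff.mpr
      intro k hk
      by_cases hc : radius ≤ (n : Int)
      · exfalso
        have : min radius (n : Int) = radius := min_eq_left hc
        have hMR' : M = R := by omega
        rw [hMR'] at hk
        simp at hk
      · have hmin : min radius (n : Int) = (n : Int) := min_eq_right (le_of_lt (lt_of_not_ge hc))
        have hMn : M = n + 1 := by omega
        have hkn : n < k := by
          have := (List.mem_range'_1.mp hk).1
          omega
        unfold aLevelN
        rw [combN_eq_nil_of_lt _ _ (by simpa using hkn)]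
        rfl
    rw [hnil, List.append_nil, List.range_eq_range']
  have hBnodup : ((List.range M).flatMap (bLevelN cs alpha)).Nodup := by
    rw [← hmain]
    exact PySem.Set.nodup_ofList _
  rw [hamming_sphere_eq_ofList, hamming_sphere_alt_eq_ofList]
  rw [← hR, ← hM, htrunc, hmain, PySem.Set.ofList_eq_self_of_nodup _ hBnodup]
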